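-- pv_equiv track=rewrite | github.com/ANITS60106/BAPDZ | HOrniye_tsepy.py | k_tasamayaraznitsaprokotoruyugovorilRuslan
-- ===== SOURCE A (Python) =====
-- def tsepytuponaiti(h, k):
--     count = 1
--     for i in range(len(h) - 1):
--         if abs(h[i] - h[i + 1]) > k:
--             count += 1
--     return count
--
-- def k_tasamayaraznitsaprokotoruyugovorilRuslan(n, m, h):
--     low = 0
--     rostiks = 1000000
--     out = -1
--
--     while low <= rostiks:
--         mid = (low + rostiks) // 2
--         с = tsepytuponaiti(h, mid)
--
--         if с == m:
--             out = mid
--             rostiks = mid - 1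
--         elif с < m:
--             rostiks = mid - 1
--         else:
--             low = mid + 1
--
--     return out
-- ===== SOURCE B (Python) =====
-- def k_tasamayaraznitsaprokotoruyugovorilRuslan(n, m, h):
--     d = sorted((abs(h[i] - h[i + 1]) for i in range(len(h) - 1)), reverse=True)
--     t = m - 1
--     if t < 0 or t > len(d):
--         return -1
--     k = 0 if t == len(d) else d[t]
--     if t > 0 and d[t - 1] <= k:
--         return -1
--     return k if k <= 1000000 else -1
-- ===== Notes on version B (the rewrite author's own statement) =====
-- stated objective: faster
-- what changed: B replaces A's binary search over the threshold range [0,10^6] (each probe rescanning the whole list) by computing the adjacent differences once, sorting them descending, and reading the answer (the (m-1)-th largest difference) directly off the sorted list with tie/bound checks for -1.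
import Mathlib
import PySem

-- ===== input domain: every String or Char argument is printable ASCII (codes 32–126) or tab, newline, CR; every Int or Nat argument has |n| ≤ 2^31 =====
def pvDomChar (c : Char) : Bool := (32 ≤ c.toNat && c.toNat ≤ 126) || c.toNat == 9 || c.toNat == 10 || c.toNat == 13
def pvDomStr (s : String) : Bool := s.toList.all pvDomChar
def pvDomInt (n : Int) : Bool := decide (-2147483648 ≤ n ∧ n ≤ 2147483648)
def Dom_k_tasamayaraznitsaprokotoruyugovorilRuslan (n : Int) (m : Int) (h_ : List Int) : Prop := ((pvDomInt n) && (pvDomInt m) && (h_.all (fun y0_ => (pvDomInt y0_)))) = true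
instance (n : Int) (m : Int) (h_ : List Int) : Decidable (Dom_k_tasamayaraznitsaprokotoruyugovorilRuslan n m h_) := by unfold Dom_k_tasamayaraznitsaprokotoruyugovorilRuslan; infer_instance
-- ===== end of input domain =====

-- B computes the adjacent differences once, sorts them descending and reads the answer
-- (the (m-1)-th largest difference, with tie/bound checks for -1) directly, instead of
-- A's binary search over [0, 10^6] that rescans the whole list at every probe.

-- ===== PORT A =====
-- helper tsepytuponaiti: count of chains for threshold k (locals inlined; same steps)
def tsepytuponaiti (h_ : List Int) (k : Int) : Int :=
  (PySem.List.pyRange 0 ((h_.length : Int) - 1) 1).foldl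
    (fun count i =>
      if |PySem.List.pyGetD h_ i 0 - PySem.List.pyGetD h_ (i + 1) 0| > k then count + 1
      else count) 1

-- the while-loop of A; 'mid' and 'с' are written out in place of the Python locals
def kRuslanLoop (m : Int) (h_ : List Int) (low rostiks out : Int) : Int :=
  if hlr : low ≤ rostiks then
    if tsepytuponaiti h_ (PySem.Int.floordiv (low + rostiks) 2) = m then
      kRuslanLoop m h_ low (PySem.Int.floordiv (low + rostiks) 2 - 1)
        (PySem.Int.floordiv (low + rostiks) 2)
    else if tsepytuponaiti h_ (PySem.Int.floordiv (low + rostiks) 2) < m then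
      kRuslanLoop m h_ low (PySem.Int.floordiv (low + rostiks) 2 - 1) out
    else
      kRuslanLoop m h_ (PySem.Int.floordiv (low + rostiks) 2 + 1) rostiks out
  else out
termination_by (rostiks + 1 - low).toNat
decreasing_by
  all_goals
    have hb := PySem.Int.floordiv_two_mid_bounds hlr
    omega

def k_tasamayaraznitsaprokotoruyugovorilRuslan (n : Int) (m : Int) (h_ : List Int) : Int :=
  kRuslanLoop m h_ 0 1000000 (-1)

-- ===== PORT B =====
-- the generator expression of Source B: adjacent absolute differences
def diffsB (h_ : List Int) : List Int :=
  (PySem.List.pyRange 0 ((h_.length : Int) - 1) 1).map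
    (fun i => |PySem.List.pyGetD h_ i 0 - PySem.List.pyGetD h_ (i + 1) 0|)

-- d = sorted(..., reverse=True) of Source B
def dSorted (h_ : List Int) : List Int :=
  PySem.List.sorted (diffsB h_) (fun x => x) true

-- k = 0 if t == len(d) else d[t]  (Source B's local k, with t = m - 1)
def kCand (h_ : List Int) (t : Int) : Int :=
  if t = ((dSorted h_).length : Int) then 0 else PySem.List.pyGetD (dSorted h_) t 0

def k_tasamayaraznitsaprokotoruyugovorilRuslan_alt (n : Int) (m : Int) (h_ : List Int) : Int :=
  if m - 1 < 0 ∨ ((dSorted h_).length : Int) < m - 1 then -1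
  else if 0 < m - 1 ∧ PySem.List.pyGetD (dSorted h_) (m - 2) 0 ≤ kCand h_ (m - 1) then -1
  else if kCand h_ (m - 1) ≤ 1000000 then kCand h_ (m - 1)
  else -1

-- ===== PRECONDITION & SPEC =====
def Spec_k_tasamayaraznitsaprokotoruyugovorilRuslan (n : Int) (m : Int) (h_ : List Int) (out : Int) : Prop := out = k_tasamayaraznitsaprokotoruyugovorilRuslan_alt n m h_
instance (n : Int) (m : Int) (h_ : List Int) (out : Int) : Decidable (Spec_k_tasamayaraznitsaprokotoruyugovorilRuslan n m h_ out) := by unfold Spec_k_tasamayaraznitsaprokotoruyugovorilRuslan; infer_instance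

-- ===== CLAIM (what is proved, stated in full; the proofs are below) =====
def Claim_equal_k_tasamayaraznitsaprokotoruyugovorilRuslan : Prop := ∀ (n : Int) (m : Int) (h_ : List Int), Dom_k_tasamayaraznitsaprokotoruyugovorilRuslan n m h_ → Spec_k_tasamayaraznitsaprokotoruyugovorilRuslan n m h_ (k_tasamayaraznitsaprokotoruyugovorilRuslan n m h_)

-- ===== LEMMAS AND PROOFS =====

-- "r is the minimal k in [a, 10^6] with chain count m, or -1 if there is none"
def IsMinFrom (h_ : List Int) (m a r : Int) : Prop :=
  (r = -1 ∧ ∀ k : Int, a ≤ k → k ≤ 1000000 → tsepytuponaiti h_ k ≠ m) ∨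
  (a ≤ r ∧ r ≤ 1000000 ∧ tsepytuponaiti h_ r = m ∧
    ∀ k : Int, a ≤ k → k < r → tsepytuponaiti h_ k ≠ m)

-- the counting fold of A's helper is 1 + countP over the mapped list
lemma foldl_if_count (h_ : List Int) (k : Int) : ∀ (l : List Int) (a : Int),
    l.foldl
      (fun count i =>
        if |PySem.List.pyGetD h_ i 0 - PySem.List.pyGetD h_ (i + 1) 0| > k then count + 1
        else count) a
      = a + ((l.map
          (fun i => |PySem.List.pyGetD h_ i 0 - PySem.List.pyGetD h_ (i + 1) 0|)).countP
          (fun x => decide (k < x)) : Int) := by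
  intro l
  induction l with
  | nil => intro a; simp
  | cons x xs ih =>
    intro a
    simp only [List.foldl_cons, List.map_cons, List.countP_cons, ih]
    by_cases hx : k < |PySem.List.pyGetD h_ x 0 - PySem.List.pyGetD h_ (x + 1) 0|
    · simp only [hx, if_pos, decide_eq_true_eq]
      push_cast
      ring
    · rw [if_neg hx]
      simp only [decide_eq_true_eq, hx]
      push_cast
      simp [hx]

lemma tsep_eq_cnt (h_ : List Int) (k : Int) :
    tsepytuponaiti h_ k
      = 1 + (((dSorted h_).countP (fun x => decide (k < x))) : Int) := by
  unfold tsepytuponaiti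
  rw [foldl_if_count]
  have hperm : (dSorted h_).Perm (diffsB h_) :=
    PySem.List.sorted_perm (diffsB h_) (fun x => x) true
  rw [List.Perm.countP_eq _ hperm]
  rfl

lemma tsep_mono (h_ : List Int) {k k' : Int} (hkk : k ≤ k') :
    tsepytuponaiti h_ k' ≤ tsepytuponaiti h_ k := by
  rw [tsep_eq_cnt, tsep_eq_cnt]
  have hmono : (dSorted h_).countP (fun x => decide (k' < x))
      ≤ (dSorted h_).countP (fun x => decide (k < x)) := by
    apply List.countP_mono_left
    intro a _ hpa
    simp only [decide_eq_true_eq] at hpa ⊢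
    omega
  omega

-- the two counting facts about a descending-sorted list
lemma descCount_le (L : List Int) (hp : L.Pairwise (fun a b => b ≤ a)) :
    ∀ (t : Nat) (ht : t < L.length) (k : Int), L[t] ≤ k →
      L.countP (fun x => decide (k < x)) ≤ t := by
  induction L with
  | nil => intro t ht; simp at ht
  | cons x xs ih =>
    rcases List.pairwise_cons.mp hp with ⟨hx, hxs⟩
    intro t ht k hle
    cases t with
    | zero =>
      have hall : ∀ a ∈ x :: xs, ¬ ((fun x => decide (k < x)) a = true) := by
        intro a ha
        simp only [decide_eq_true_eq]
        rcases List.mem_cons.mp ha with rfl | hmem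
        · simp at hle; omega
        · have := hx a hmem
          simp at hle; omega
      simp [List.countP_eq_zero.mpr hall]
    | succ s =>
      have h1 := ih hxs s (by simpa using ht) k (by simpa using hle)
      rw [List.countP_cons]
      by_cases hpx : k < x
      · simp only [decide_eq_true_eq, hpx, if_pos]; omega
      · simp only [decide_eq_true_eq, hpx, if_false]; omega

lemma descCount_ge (L : List Int) (hp : L.Pairwise (fun a b => b ≤ a)) :
    ∀ (t : Nat) (ht : t < L.length) (k : Int), k < L[t] →
      t + 1 ≤ L.countP (fun x => decide (k < x)) := by
  induction L with
  | nil => intro t ht; simp at ht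
  | cons x xs ih =>
    rcases List.pairwise_cons.mp hp with ⟨hx, hxs⟩
    intro t ht k hlt
    cases t with
    | zero =>
      simp at hlt
      rw [List.countP_cons]
      simp only [decide_eq_true_eq, hlt, if_pos]
      omega
    | succ s =>
      have hs : s < xs.length := by simpa using ht
      have h1 := ih hxs s hs k (by simpa using hlt)
      have hxk : k < x := by
        have hmem : xs[s] ∈ xs := List.getElem_mem hs
        have := hx _ hmem
        simp at hlt
        omega
      rw [List.countP_cons]
      simp only [decide_eq_true_eq, hxk, if_pos]
      omega

-- ===== A-side: the binary search returns the minimum =====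

lemma exit_case (m : Int) (h_ : List Int) (low rostiks out : Int)
    (hnle : ¬ low ≤ rostiks) (hr1 : -1 ≤ rostiks)
    (hbelow : ∀ k, 0 ≤ k → k < low → m < tsepytuponaiti h_ k)
    (hout : IsMinFrom h_ m (rostiks + 1) out) : IsMinFrom h_ m 0 out := by
  rcases hout with ⟨ho1, ho2⟩ | ⟨ho1, ho2, ho3, ho4⟩
  · left
    refine ⟨ho1, fun k hk0 hk6 => ?_⟩
    by_cases hks : rostiks + 1 ≤ k
    · exact ho2 k hks hk6
    · have := hbelow k hk0 (by omega); omega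
  · right
    refine ⟨by omega, ho2, ho3, fun k hk0 hklt => ?_⟩
    by_cases hks : rostiks + 1 ≤ k
    · exact ho4 k hks hklt
    · have := hbelow k hk0 (by omega); omega

lemma loop_isMin (m : Int) (h_ : List Int) :
    ∀ (N : Nat) (low rostiks out : Int), (rostiks + 1 - low).toNat ≤ N →
      0 ≤ low → -1 ≤ rostiks → rostiks ≤ 1000000 →
      (∀ k, 0 ≤ k → k < low → m < tsepytuponaiti h_ k) →
      IsMinFrom h_ m (rostiks + 1) out →
      IsMinFrom h_ m 0 (kRuslanLoop m h_ low rostiks out) := by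
  intro N
  induction N with
  | zero =>
    intro low rostiks out hN hlow hr1 hr6 hbelow hout
    have hnle : ¬ low ≤ rostiks := by omega
    rw [kRuslanLoop.eq_def, dif_neg hnle]
    exact exit_case m h_ low rostiks out hnle hr1 hbelow hout
  | succ N ih =>
    intro low rostiks out hN hlow hr1 hr6 hbelow hout
    rw [kRuslanLoop.eq_def]
    by_cases hlr : low ≤ rostiks
    · rw [dif_pos hlr]
      have hmid := PySem.Int.floordiv_two_mid_bounds hlr
      split_ifs with hc1 hc2
      · apply ih low (PySem.Int.floordiv (low + rostiks) 2 - 1)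
          (PySem.Int.floordiv (low + rostiks) 2) (by omega) hlow (by omega) (by omega) hbelow
        right
        exact ⟨by omega, by omega, hc1, fun k hk1 hk2 => by omega⟩
      · apply ih low (PySem.Int.floordiv (low + rostiks) 2 - 1) out (by omega) hlow
          (by omega) (by omega) hbelow
        have hext : ∀ k, PySem.Int.floordiv (low + rostiks) 2 ≤ k → k ≤ rostiks →
            tsepytuponaiti h_ k ≠ m := by
          intro k hk1 hk2 heq
          have hle := tsep_mono h_ hk1
          omega
        rcases hout with ⟨ho1, ho2⟩ | ⟨ho1, ho2, ho3, ho4⟩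
        · left
          refine ⟨ho1, fun k hk1 hk2 => ?_⟩
          by_cases hksm : k ≤ rostiks
          · exact hext k (by omega) hksm
          · exact ho2 k (by omega) hk2
        · right
          refine ⟨by omega, ho2, ho3, fun k hk1 hk2 => ?_⟩
          by_cases hksm : k ≤ rostiks
          · exact hext k (by omega) hksm
          · exact ho4 k (by omega) hk2
      · apply ih (PySem.Int.floordiv (low + rostiks) 2 + 1) rostiks out (by omega)
          (by omega) hr1 hr6 ?_ hout
        intro k hk0 hklt
        by_cases hkl : k < low
        · exact hbelow k hk0 hkl
        · have := tsep_mono h_ (show k ≤ PySem.Int.floordiv (low + rostiks) 2 by omega)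
          omega
    · rw [dif_neg hlr]
      exact exit_case m h_ low rostiks out hlr hr1 hbelow hout

lemma a_isMin (n m : Int) (h_ : List Int) :
    IsMinFrom h_ m 0 (k_tasamayaraznitsaprokotoruyugovorilRuslan n m h_) := by
  unfold k_tasamayaraznitsaprokotoruyugovorilRuslan
  apply loop_isMin m h_ 1000001 0 1000000 (-1) (by omega) (by omega) (by omega) (by omega)
  · intro k hk0 hklt; omega
  · left
    exact ⟨rfl, fun k hk1 hk2 => by omega⟩

-- ===== B-side: the sorted-differences formula returns the minimum =====

lemma alt_isMin (n m : Int) (h_ : List Int) :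
    IsMinFrom h_ m 0 (k_tasamayaraznitsaprokotoruyugovorilRuslan_alt n m h_) := by
  have hpair : (dSorted h_).Pairwise (fun a b => b ≤ a) := by
    have := PySem.List.sorted_pairwise_rev (diffsB h_) (fun x => x)
    simpa [dSorted] using this
  have hnn : ∀ x ∈ dSorted h_, 0 ≤ x := by
    intro x hx
    unfold dSorted at hx
    rw [PySem.List.mem_sorted] at hx
    unfold diffsB at hx
    simp only [List.mem_map] at hx
    obtain ⟨i, _, rfl⟩ := hx
    exact abs_nonneg _
  have hT : ∀ k : Int, tsepytuponaiti h_ k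
      = 1 + (((dSorted h_).countP (fun x => decide (k < x))) : Int) := tsep_eq_cnt h_
  have hcle : ∀ k : Int,
      (dSorted h_).countP (fun x => decide (k < x)) ≤ (dSorted h_).length :=
    fun _ => List.countP_le_length
  unfold k_tasamayaraznitsaprokotoruyugovorilRuslan_alt
  split_ifs with hc1 hc2 hc3
  · -- m - 1 < 0 or len < m - 1: no k can give count m
    left
    refine ⟨rfl, fun k hk0 hk6 heq => ?_⟩
    have h1 := hT k
    have h2 := hcle k
    rcases hc1 with hlt | hgt
    · omega
    · omega
  · -- tie (or zero bound at t = len): no k can give count m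
    push_neg at hc1
    obtain ⟨htpos, hdle⟩ := hc2
    left
    refine ⟨rfl, fun k hk0 hk6 heq => ?_⟩
    have h1 := hT k
    by_cases hteq : m - 1 = ((dSorted h_).length : Int)
    · -- kCand = 0, last element ≤ 0, yet all elements must exceed k ≥ 0
      have hkc : kCand h_ (m - 1) = 0 := by unfold kCand; rw [if_pos hteq]
      rw [hkc] at hdle
      rw [PySem.List.pyGetD_eq_getElem _ _ (by omega) (by omega)] at hdle
      have hcntlen : (dSorted h_).countP (fun x => decide (k < x)) = (dSorted h_).length := by
        omega
      have hall := List.countP_eq_length.mp hcntlen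
      have hlt : (m - 2).toNat < (dSorted h_).length := by omega
      have hmem : (dSorted h_)[(m - 2).toNat] ∈ dSorted h_ := List.getElem_mem hlt
      have := hall _ hmem
      simp only [decide_eq_true_eq] at this
      omega
    · -- kCand = d[t]; d[t-1] ≤ d[t] forces no k with count exactly t
      have htlt : m - 1 < ((dSorted h_).length : Int) := by omega
      have hkc : kCand h_ (m - 1) = (dSorted h_)[(m - 1).toNat] := by
        unfold kCand
        rw [if_neg hteq, PySem.List.pyGetD_eq_getElem _ _ (by omega) (by omega)]
      rw [hkc] at hdle
      rw [PySem.List.pyGetD_eq_getElem _ _ (by omega) (by omega)] at hdle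
      by_cases hklt : k < (dSorted h_)[(m - 1).toNat]
      · have := descCount_ge (dSorted h_) hpair (m - 1).toNat (by omega) k hklt
        omega
      · have hk2 : (dSorted h_)[(m - 2).toNat] ≤ k := by omega
        have := descCount_le (dSorted h_) hpair (m - 2).toNat (by omega) k hk2
        omega
  · -- return kCand: it is the minimum
    push_neg at hc1 hc2
    by_cases hteq : m - 1 = ((dSorted h_).length : Int)
    · have hkc : kCand h_ (m - 1) = 0 := by unfold kCand; rw [if_pos hteq]
      right
      refine ⟨by omega, by omega, ?_, fun k hk0 hklt => by omega⟩
      rw [hT, hkc]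
      have hcnt : (dSorted h_).countP (fun x => decide ((0:Int) < x)) = (dSorted h_).length := by
        apply List.countP_eq_length.mpr
        intro a ha
        simp only [decide_eq_true_eq]
        obtain ⟨j, hj, rfl⟩ := List.mem_iff_getElem.mp ha
        have hlpos : 0 < (dSorted h_).length := by omega
        have htpos : 0 < m - 1 := by omega
        have hlast := hc2 htpos
        rw [hkc] at hlast
        rw [PySem.List.pyGetD_eq_getElem _ _ (by omega) (by omega)] at hlast
        have hj2 : (m - 2).toNat < (dSorted h_).length := by omega
        by_cases hjeq : j = (m - 2).toNat
        · subst hjeq; omega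
        · have hjlt : j < (m - 2).toNat := by omega
          have := (List.pairwise_iff_getElem.mp hpair) j (m - 2).toNat hj hj2 hjlt
          omega
      rw [hcnt]
      omega
    · have htlt : m - 1 < ((dSorted h_).length : Int) := by omega
      have hkc : kCand h_ (m - 1) = (dSorted h_)[(m - 1).toNat] := by
        unfold kCand
        rw [if_neg hteq, PySem.List.pyGetD_eq_getElem _ _ (by omega) (by omega)]
      have hkc0 : 0 ≤ kCand h_ (m - 1) := by
        rw [hkc]
        exact hnn _ (List.getElem_mem (by omega))
      right
      refine ⟨by omega, hc3, ?_, fun k hk0 hklt => ?_⟩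
      · -- count at kCand is exactly m
        rw [hT]
        have hle := descCount_le (dSorted h_) hpair (m - 1).toNat (by omega)
          (kCand h_ (m - 1)) (by omega)
        have hge : (m - 1) ≤ ((dSorted h_).countP
            (fun x => decide (kCand h_ (m - 1) < x)) : Int) := by
          by_cases htpos : 0 < m - 1
          · have hlast := hc2 htpos
            rw [PySem.List.pyGetD_eq_getElem _ _ (by omega) (by omega)] at hlast
            have := descCount_ge (dSorted h_) hpair (m - 2).toNat (by omega)
              (kCand h_ (m - 1)) (by omega)
            omega
          · omega
        omega
      · -- nothing below kCand gives count m
        have := descCount_ge (dSorted h_) hpair (m - 1).toNat (by omega) k (by omega)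
        have h1 := hT k
        omega
  · -- kCand > 10^6: nothing in [0, 10^6] gives count m
    push_neg at hc1 hc2 hc3
    left
    refine ⟨rfl, fun k hk0 hk6 heq => ?_⟩
    by_cases hteq : m - 1 = ((dSorted h_).length : Int)
    · have hkc : kCand h_ (m - 1) = 0 := by unfold kCand; rw [if_pos hteq]
      omega
    · have htlt : m - 1 < ((dSorted h_).length : Int) := by omega
      have hkc : kCand h_ (m - 1) = (dSorted h_)[(m - 1).toNat] := by
        unfold kCand
        rw [if_neg hteq, PySem.List.pyGetD_eq_getElem _ _ (by omega) (by omega)]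
      have := descCount_ge (dSorted h_) hpair (m - 1).toNat (by omega) k (by omega)
      have h1 := hT k
      omega

-- the minimum is unique
lemma isMin_unique {h_ : List Int} {m r r' : Int}
    (h1 : IsMinFrom h_ m 0 r) (h2 : IsMinFrom h_ m 0 r') : r = r' := by
  rcases h1 with ⟨e1, f1⟩ | ⟨a1, b1, c1, d1⟩ <;> rcases h2 with ⟨e2, f2⟩ | ⟨a2, b2, c2, d2⟩
  · rw [e1, e2]
  · exact absurd c2 (f1 r' a2 b2)
  · exact absurd c1 (f2 r a1 b1)
  · by_contra hne
    rcases lt_or_gt_of_ne hne with hlt | hlt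
    · exact d2 r a1 hlt c1
    · exact d1 r' a2 hlt c2

-- ===== VERDICT (by name: the statement is the Claim_ definition above) =====
theorem k_tasamayaraznitsaprokotoruyugovorilRuslan_spec : Claim_equal_k_tasamayaraznitsaprokotoruyugovorilRuslan := by
  intro n m h_ _
  unfold Spec_k_tasamayaraznitsaprokotoruyugovorilRuslan
  exact isMin_unique (a_isMin n m h_) (alt_isMin n m h_)
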